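-- pv_equiv track=rewrite | github.com/AntreasCh/jarvis-cv | web_app_railway.py | generate_ai_response
-- ===== SOURCE A (Python) =====
-- def generate_ai_response(message):
--     """Generate AI response based on message content"""
--     message_lower = message.lower()
--
--     # Hiring questions
--     if any(word in message_lower for word in ['hire', 'hiring', 'job', 'position', 'role', 'candidate']):
--         return "Andreas is an excellent candidate for backend development roles. His 90% performance improvement on Elasticsearch reindexing and experience with Java, Node.js, and scalable systems make him ideal for senior backend positions. He's particularly strong in performance optimization and has proven leadership experience mentoring junior developers."
--
--     # Technical questions
--     elif any(word in message_lower for word in ['java', 'elasticsearch', 'database', 'backend', 'api', 'performance']):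
--         return "Andreas has extensive experience with Java 8/11, Elasticsearch 7.x-8.x, PostgreSQL, and MongoDB. He specializes in performance optimization, having reduced reindexing time from 10 hours to 50 minutes. His expertise includes query optimization, batching, streaming, and building resilient systems with proper error handling."
--
--     # Frontend questions
--     elif any(word in message_lower for word in ['frontend', 'javascript', 'ui', 'ext.js', 'sap']):
--         return "While Andreas focuses on backend development, he has solid frontend experience with JavaScript (ES6+), Ext.js, SAP Fiori (UI5), and custom lightweight frameworks. He successfully migrated a frontend from Angular to a custom JavaScript framework, improving maintainability and performance."
--
--     # Experience questions
--     elif any(word in message_lower for word in ['experience', 'work', 'company', 'projects']):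
--         return "Andreas has been working as a Software Developer since July 2023 at a CRM/CMS Platform. He works in a 4-6 person agile team and has delivered major projects including Elasticsearch optimization, CalDAV calendar sync, and a Bulk Actions Manager. His work environment is startup-style with direct ownership of features."
--
--     # Education questions
--     elif any(word in message_lower for word in ['education', 'university', 'degree', 'study']):
--         return "Andreas holds a BSc Computer Science (First Class Honours) from Northumbria University (2020-2023). His dissertation compared PHP vs Python for microservices in e-marketing, focusing on performance metrics. He studied databases, distributed systems, and software engineering, building a strong foundation for backend development."
--
--     # General questions
--     else:
--         return "Andreas is a Full-Stack Software Engineer with a Back-End Focus, currently working as a Software Developer. He specializes in resilient, data-heavy systems and has significant experience with Elasticsearch, Java, Node.js, and various databases. He's based in Paphos, Cyprus, and is fluent in English and Greek."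
-- ===== SOURCE B (Python) =====
-- _ANSWERS = [
--     "Andreas is an excellent candidate for backend development roles. His 90% performance improvement on Elasticsearch reindexing and experience with Java, Node.js, and scalable systems make him ideal for senior backend positions. He's particularly strong in performance optimization and has proven leadership experience mentoring junior developers.",
--     "Andreas has extensive experience with Java 8/11, Elasticsearch 7.x-8.x, PostgreSQL, and MongoDB. He specializes in performance optimization, having reduced reindexing time from 10 hours to 50 minutes. His expertise includes query optimization, batching, streaming, and building resilient systems with proper error handling.",
--     "While Andreas focuses on backend development, he has solid frontend experience with JavaScript (ES6+), Ext.js, SAP Fiori (UI5), and custom lightweight frameworks. He successfully migrated a frontend from Angular to a custom JavaScript framework, improving maintainability and performance.",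
--     "Andreas has been working as a Software Developer since July 2023 at a CRM/CMS Platform. He works in a 4-6 person agile team and has delivered major projects including Elasticsearch optimization, CalDAV calendar sync, and a Bulk Actions Manager. His work environment is startup-style with direct ownership of features.",
--     "Andreas holds a BSc Computer Science (First Class Honours) from Northumbria University (2020-2023). His dissertation compared PHP vs Python for microservices in e-marketing, focusing on performance metrics. He studied databases, distributed systems, and software engineering, building a strong foundation for backend development.",
--     "Andreas is a Full-Stack Software Engineer with a Back-End Focus, currently working as a Software Developer. He specializes in resilient, data-heavy systems and has significant experience with Elasticsearch, Java, Node.js, and various databases. He's based in Paphos, Cyprus, and is fluent in English and Greek.",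
-- ]
--
-- # one flat keyword -> category-index map (0 = hiring .. 4 = education; 5 = general default)
-- _KEYWORD_CATEGORY = {
--     'hire': 0, 'hiring': 0, 'job': 0, 'position': 0, 'role': 0, 'candidate': 0,
--     'java': 1, 'elasticsearch': 1, 'database': 1, 'backend': 1, 'api': 1, 'performance': 1,
--     'frontend': 2, 'javascript': 2, 'ui': 2, 'ext.js': 2, 'sap': 2,
--     'experience': 3, 'work': 3, 'company': 3, 'projects': 3,
--     'education': 4, 'university': 4, 'degree': 4, 'study': 4,
-- }
--
--
-- def generate_ai_response(message):
--     """Generate AI response based on message content"""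
--     message_lower = message.lower()
--     best = 5
--     for keyword, category in _KEYWORD_CATEGORY.items():
--         if keyword in message_lower:
--             best = min(best, category)
--     return _ANSWERS[best]
-- ===== Notes on version B (the rewrite author's own statement) =====
-- stated objective: alternative
-- what changed: Replaces the priority-ordered if-elif chain of per-category any() tests by one flat keyword-to-category-index map scanned in a single pass that keeps the minimum matched category index (no early return), then indexes into an answer array with the general answer at index 5; priority becomes arithmetic (min) instead of control flow.
import Mathlib
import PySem

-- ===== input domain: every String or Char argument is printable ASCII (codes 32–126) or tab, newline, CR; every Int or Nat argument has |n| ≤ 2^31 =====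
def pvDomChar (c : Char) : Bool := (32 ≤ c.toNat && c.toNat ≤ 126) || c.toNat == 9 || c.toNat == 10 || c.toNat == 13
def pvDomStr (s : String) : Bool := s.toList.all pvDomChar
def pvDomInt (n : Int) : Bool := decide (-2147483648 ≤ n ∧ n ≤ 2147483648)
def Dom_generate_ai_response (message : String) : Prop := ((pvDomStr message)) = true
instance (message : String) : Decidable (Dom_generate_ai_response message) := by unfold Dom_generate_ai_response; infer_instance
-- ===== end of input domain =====

-- B replaces A's priority if-elif chain by a flat keyword→category map, a single min-index pass and an answer-array lookup (alternative, same cost).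

-- ===== PORT A =====
def generate_ai_response (message : String) : String :=
  let message_lower := PySem.Str.lower message
  if (["hire", "hiring", "job", "position", "role", "candidate"] : List String).any
      (fun word => PySem.Str.isIn word message_lower) then
    "Andreas is an excellent candidate for backend development roles. His 90% performance improvement on Elasticsearch reindexing and experience with Java, Node.js, and scalable systems make him ideal for senior backend positions. He's particularly strong in performance optimization and has proven leadership experience mentoring junior developers."
  else if (["java", "elasticsearch", "database", "backend", "api", "performance"] : List String).any
      (fun word => PySem.Str.isIn word message_lower) then
    "Andreas has extensive experience with Java 8/11, Elasticsearch 7.x-8.x, PostgreSQL, and MongoDB. He specializes in performance optimization, having reduced reindexing time from 10 hours to 50 minutes. His expertise includes query optimization, batching, streaming, and building resilient systems with proper error handling."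
  else if (["frontend", "javascript", "ui", "ext.js", "sap"] : List String).any
      (fun word => PySem.Str.isIn word message_lower) then
    "While Andreas focuses on backend development, he has solid frontend experience with JavaScript (ES6+), Ext.js, SAP Fiori (UI5), and custom lightweight frameworks. He successfully migrated a frontend from Angular to a custom JavaScript framework, improving maintainability and performance."
  else if (["experience", "work", "company", "projects"] : List String).any
      (fun word => PySem.Str.isIn word message_lower) then
    "Andreas has been working as a Software Developer since July 2023 at a CRM/CMS Platform. He works in a 4-6 person agile team and has delivered major projects including Elasticsearch optimization, CalDAV calendar sync, and a Bulk Actions Manager. His work environment is startup-style with direct ownership of features."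
  else if (["education", "university", "degree", "study"] : List String).any
      (fun word => PySem.Str.isIn word message_lower) then
    "Andreas holds a BSc Computer Science (First Class Honours) from Northumbria University (2020-2023). His dissertation compared PHP vs Python for microservices in e-marketing, focusing on performance metrics. He studied databases, distributed systems, and software engineering, building a strong foundation for backend development."
  else
    "Andreas is a Full-Stack Software Engineer with a Back-End Focus, currently working as a Software Developer. He specializes in resilient, data-heavy systems and has significant experience with Elasticsearch, Java, Node.js, and various databases. He's based in Paphos, Cyprus, and is fluent in English and Greek."

-- ===== PORT B =====
def pvAnswers : List String :=
  [ "Andreas is an excellent candidate for backend development roles. His 90% performance improvement on Elasticsearch reindexing and experience with Java, Node.js, and scalable systems make him ideal for senior backend positions. He's particularly strong in performance optimization and has proven leadership experience mentoring junior developers.",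
    "Andreas has extensive experience with Java 8/11, Elasticsearch 7.x-8.x, PostgreSQL, and MongoDB. He specializes in performance optimization, having reduced reindexing time from 10 hours to 50 minutes. His expertise includes query optimization, batching, streaming, and building resilient systems with proper error handling.",
    "While Andreas focuses on backend development, he has solid frontend experience with JavaScript (ES6+), Ext.js, SAP Fiori (UI5), and custom lightweight frameworks. He successfully migrated a frontend from Angular to a custom JavaScript framework, improving maintainability and performance.",
    "Andreas has been working as a Software Developer since July 2023 at a CRM/CMS Platform. He works in a 4-6 person agile team and has delivered major projects including Elasticsearch optimization, CalDAV calendar sync, and a Bulk Actions Manager. His work environment is startup-style with direct ownership of features.",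
    "Andreas holds a BSc Computer Science (First Class Honours) from Northumbria University (2020-2023). His dissertation compared PHP vs Python for microservices in e-marketing, focusing on performance metrics. He studied databases, distributed systems, and software engineering, building a strong foundation for backend development.",
    "Andreas is a Full-Stack Software Engineer with a Back-End Focus, currently working as a Software Developer. He specializes in resilient, data-heavy systems and has significant experience with Elasticsearch, Java, Node.js, and various databases. He's based in Paphos, Cyprus, and is fluent in English and Greek." ]

-- the flat keyword → category-index dict of Source B, in insertion order
def pvKeywordCategory : List (String × Nat) :=
  [ ("hire", 0), ("hiring", 0), ("job", 0), ("position", 0), ("role", 0), ("candidate", 0),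
    ("java", 1), ("elasticsearch", 1), ("database", 1), ("backend", 1), ("api", 1), ("performance", 1),
    ("frontend", 2), ("javascript", 2), ("ui", 2), ("ext.js", 2), ("sap", 2),
    ("experience", 3), ("work", 3), ("company", 3), ("projects", 3),
    ("education", 4), ("university", 4), ("degree", 4), ("study", 4) ]

def generate_ai_response_alt (message : String) : String :=
  let message_lower := PySem.Str.lower message
  let best := pvKeywordCategory.foldl
    (fun best p => if PySem.Str.isIn p.1 message_lower then min best p.2 else best) 5
  pvAnswers.getD best ""

-- ===== PRECONDITION & SPEC =====
def Spec_generate_ai_response (message : String) (out : String) : Prop := out = generate_ai_response_alt message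
instance (message : String) (out : String) : Decidable (Spec_generate_ai_response message out) := by unfold Spec_generate_ai_response; infer_instance

-- ===== CLAIM (what is proved, stated in full; the proofs are below) =====
def Claim_equal_generate_ai_response : Prop := ∀ (message : String), Dom_generate_ai_response message → Spec_generate_ai_response message (generate_ai_response message)

-- ===== LEMMAS AND PROOFS =====

-- B's min-fold over one category's keyword segment equals a single guarded min on that category's any() test
theorem pv_foldl_seg (m : String) (i : Nat) (kws : List String) (acc : Nat) :
    List.foldl (fun best p => if PySem.Str.isIn p.1 m then min best p.2 else best) acc
      (kws.map (fun k => (k, i)))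
    = if kws.any (fun word => PySem.Str.isIn word m) then min acc i else acc := by
  induction kws generalizing acc with
  | nil => simp
  | cons k rest ih =>
      simp only [List.map_cons, List.foldl_cons, List.any_cons, Bool.or_eq_true]
      by_cases h : PySem.Str.isIn k m = true
      · rw [if_pos h, ih]
        by_cases h2 : (rest.any fun word => PySem.Str.isIn word m) = true
        · rw [if_pos h2, if_pos (Or.inl h), Nat.min_assoc, Nat.min_self]
        · rw [if_neg h2, if_pos (Or.inl h)]
      · rw [if_neg h, ih]
        by_cases h2 : (rest.any fun word => PySem.Str.isIn word m) = true
        · rw [if_pos h2, if_pos (Or.inr h2)]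
        · rw [if_neg h2, if_neg (fun hc => Or.elim hc h h2)]

-- ===== VERDICT (by name: the statement is the Claim_ definition above) =====
theorem generate_ai_response_spec : Claim_equal_generate_ai_response := by
  intro message _
  unfold Spec_generate_ai_response generate_ai_response generate_ai_response_alt
  have hsplit : pvKeywordCategory =
      ((["hire", "hiring", "job", "position", "role", "candidate"] : List String).map (fun k => (k, 0)))
      ++ ((["java", "elasticsearch", "database", "backend", "api", "performance"] : List String).map (fun k => (k, 1)))
      ++ ((["frontend", "javascript", "ui", "ext.js", "sap"] : List String).map (fun k => (k, 2)))
      ++ ((["experience", "work", "company", "projects"] : List String).map (fun k => (k, 3)))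
      ++ ((["education", "university", "degree", "study"] : List String).map (fun k => (k, 4))) := rfl
  rw [hsplit]
  simp only [List.foldl_append, pv_foldl_seg]
  cases h0 : (["hire", "hiring", "job", "position", "role", "candidate"] : List String).any
      (fun word => PySem.Str.isIn word (PySem.Str.lower message)) <;>
  cases h1 : (["java", "elasticsearch", "database", "backend", "api", "performance"] : List String).any
      (fun word => PySem.Str.isIn word (PySem.Str.lower message)) <;>
  cases h2 : (["frontend", "javascript", "ui", "ext.js", "sap"] : List String).any
      (fun word => PySem.Str.isIn word (PySem.Str.lower message)) <;>
  cases h3 : (["experience", "work", "company", "projects"] : List String).any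
      (fun word => PySem.Str.isIn word (PySem.Str.lower message)) <;>
  cases h4 : (["education", "university", "degree", "study"] : List String).any
      (fun word => PySem.Str.isIn word (PySem.Str.lower message)) <;>
  rfl
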